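-- pv_equiv track=rewrite | github.com/Fadil369/brainsait-healthcare-ai | nphies_compliance.py | _validate_saudi_id
-- ===== SOURCE A (Python) =====
-- def _validate_saudi_id(id_string: str) -> bool:
--     """Validate Saudi national ID format (10 digits, starts with 1 or 2)"""
--     if not id_string or len(id_string) != 10:
--         return False
--
--     if not id_string.isdigit():
--         return False
--
--     if not id_string.startswith(('1', '2')):
--         return False
--
--     # Luhn algorithm validation for Saudi ID
--     def luhn_checksum(card_num):
--         def digits_of(n):
--             return [int(d) for d in str(n)]
--         digits = digits_of(card_num)
--         odd_digits = digits[-1::-2]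
--         even_digits = digits[-2::-2]
--         checksum = sum(odd_digits)
--         for d in even_digits:
--             checksum += sum(digits_of(d*2))
--         return checksum % 10
--
--     return luhn_checksum(id_string) == 0
-- ===== SOURCE B (Python) =====
-- def _validate_saudi_id(id_string: str) -> bool:
--     """Validate Saudi national ID format (10 digits, starts with 1 or 2)"""
--     if not id_string or len(id_string) != 10:
--         return False
--
--     if not id_string.isdigit():
--         return False
--
--     if not id_string.startswith(('1', '2')):
--         return False
--
--     # Single-pass Luhn: even indices (0,2,...,8) are doubled, last digit stays plain.
--     checksum = 0
--     for i, c in enumerate(id_string):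
--         d = int(c)
--         if i % 2 == 0:
--             d *= 2
--             if d > 9:
--                 d -= 9
--         checksum += d
--     return checksum % 10 == 0
-- ===== Notes on version B (the rewrite author's own statement) =====
-- stated objective: simpler
-- what changed: Replaces the nested luhn helper (two interleaved negative-step slices plus a str(d*2) digit round-trip re-sum) with a single enumerate pass that doubles digits at even indices, subtracting 9 when the product exceeds 9, into one checksum accumulator.
import Mathlib
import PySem

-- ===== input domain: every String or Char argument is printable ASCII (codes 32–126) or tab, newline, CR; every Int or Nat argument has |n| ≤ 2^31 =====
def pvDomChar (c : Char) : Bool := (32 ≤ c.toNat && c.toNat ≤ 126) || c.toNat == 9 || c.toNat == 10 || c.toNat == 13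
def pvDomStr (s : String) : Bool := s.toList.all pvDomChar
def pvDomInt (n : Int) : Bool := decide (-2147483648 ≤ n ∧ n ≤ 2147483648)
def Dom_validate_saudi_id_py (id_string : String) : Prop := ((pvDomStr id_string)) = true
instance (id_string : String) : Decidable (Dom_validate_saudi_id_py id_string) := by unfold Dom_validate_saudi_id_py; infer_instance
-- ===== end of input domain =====

-- B replaces A's nested luhn helper (two interleaved negative-step slices plus a string
-- round-trip digit re-sum) by a single indexed pass with one checksum accumulator (objective: simpler).

-- ===== PORT A =====
-- int(d) for one character d of str(n); the callers only reach digit (or sign of a doubled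
-- digit) characters, where Python's int() returns — getD 0 is never the raising case here.
def pyIntChar (c : Char) : Int := (PySem.Int.ofStr? (String.singleton c)).getD 0

-- digits_of(n) = [int(d) for d in str(n)]
def luhn_digits_of (n : Int) : List Int := (PySem.Int.toStr n).toList.map pyIntChar

def validate_saudi_id_py (id_string : String) : Bool :=
  if id_string.toList.isEmpty || PySem.Str.len id_string != 10 then false
  else if !(PySem.Str.strIsdigit id_string) then false
  else if !(PySem.Str.startswith id_string "1" || PySem.Str.startswith id_string "2") then false
  else
    -- luhn_checksum(id_string): str(card_num) of a str is the string itself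
    let digits := id_string.toList.map pyIntChar
    let odd_digits := (PySem.List.slice? digits (some (-1)) none (-2)).getD []
    let even_digits := (PySem.List.slice? digits (some (-2)) none (-2)).getD []
    let checksum := odd_digits.sum
    let checksum := even_digits.foldl (fun acc d => acc + (luhn_digits_of (d * 2)).sum) checksum
    PySem.Int.mod checksum 10 == 0

-- ===== PORT B =====
def validate_saudi_id_py_alt (id_string : String) : Bool :=
  if id_string.toList.isEmpty || PySem.Str.len id_string != 10 then false
  else if !(PySem.Str.strIsdigit id_string) then false
  else if !(PySem.Str.startswith id_string "1" || PySem.Str.startswith id_string "2") then false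
  else
    let checksum := (PySem.List.enumerate id_string.toList 0).foldl (fun acc p =>
      let d := (PySem.Int.ofStr? (String.singleton p.2)).getD 0
      let d := if PySem.Int.mod p.1 2 == 0 then
          (let d2 := d * 2; if d2 > 9 then d2 - 9 else d2)
        else d
      acc + d) 0
    PySem.Int.mod checksum 10 == 0

-- ===== PRECONDITION & SPEC =====
def Spec_validate_saudi_id_py (id_string : String) (out : Bool) : Prop := out = validate_saudi_id_py_alt id_string
instance (id_string : String) (out : Bool) : Decidable (Spec_validate_saudi_id_py id_string out) := by unfold Spec_validate_saudi_id_py; infer_instance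

-- ===== CLAIM (what is proved, stated in full; the proofs are below) =====
def Claim_equal_validate_saudi_id_py : Prop := ∀ (id_string : String), Dom_validate_saudi_id_py id_string → Spec_validate_saudi_id_py id_string (validate_saudi_id_py id_string)

-- ===== LEMMAS AND PROOFS =====

theorem digit_char_cases (c : Char) (h : PySem.Chars.isdigit c = true) :
    c='0'∨c='1'∨c='2'∨c='3'∨c='4'∨c='5'∨c='6'∨c='7'∨c='8'∨c='9' := by
  simp only [PySem.Chars.isdigit, Bool.and_eq_true, decide_eq_true_eq, Char.le_def,
    UInt32.le_iff_toNat_le] at h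
  have key : ∀ (d : Char), c.val.toNat = d.val.toNat → c = d := fun d h1 =>
    Char.ext (UInt32.toNat_inj.mp h1)
  have e0 : ('0':Char).val.toNat = 48 := by decide
  have e9 : ('9':Char).val.toNat = 57 := by decide
  have hn : c.val.toNat = 48 ∨ c.val.toNat = 49 ∨ c.val.toNat = 50 ∨ c.val.toNat = 51 ∨
      c.val.toNat = 52 ∨ c.val.toNat = 53 ∨ c.val.toNat = 54 ∨ c.val.toNat = 55 ∨
      c.val.toNat = 56 ∨ c.val.toNat = 57 := by omega
  rcases hn with h|h|h|h|h|h|h|h|h|h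
  · exact Or.inl (key '0' (h.trans (by decide)))
  · exact Or.inr <| Or.inl (key '1' (h.trans (by decide)))
  · exact Or.inr <| Or.inr <| Or.inl (key '2' (h.trans (by decide)))
  · exact Or.inr <| Or.inr <| Or.inr <| Or.inl (key '3' (h.trans (by decide)))
  · exact Or.inr <| Or.inr <| Or.inr <| Or.inr <| Or.inl (key '4' (h.trans (by decide)))
  · exact Or.inr <| Or.inr <| Or.inr <| Or.inr <| Or.inr <| Or.inl (key '5' (h.trans (by decide)))
  · exact Or.inr <| Or.inr <| Or.inr <| Or.inr <| Or.inr <| Or.inr <| Or.inl (key '6' (h.trans (by decide)))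
  · exact Or.inr <| Or.inr <| Or.inr <| Or.inr <| Or.inr <| Or.inr <| Or.inr <| Or.inl (key '7' (h.trans (by decide)))
  · exact Or.inr <| Or.inr <| Or.inr <| Or.inr <| Or.inr <| Or.inr <| Or.inr <| Or.inr <| Or.inl (key '8' (h.trans (by decide)))
  · exact Or.inr <| Or.inr <| Or.inr <| Or.inr <| Or.inr <| Or.inr <| Or.inr <| Or.inr <| Or.inr (key '9' (h.trans (by decide)))

theorem pyIntChar_digit (c : Char) (h : PySem.Chars.isdigit c = true) :
    0 ≤ pyIntChar c ∧ pyIntChar c ≤ 9 := by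
  rcases digit_char_cases c h with h|h|h|h|h|h|h|h|h|h <;> subst h <;> decide

-- sum(digits_of(d*2)) for a single Luhn digit, in closed form
theorem doubled_sum (d : Int) (h0 : 0 ≤ d) (h9 : d ≤ 9) :
    (luhn_digits_of (d * 2)).sum = if d * 2 > 9 then d * 2 - 9 else d * 2 := by
  interval_cases d <;> decide

theorem toNatLit : Int.toNat 5 = 5 ∧ Int.toNat 9 = 9 ∧ Int.toNat 7 = 7 ∧ Int.toNat 3 = 3 ∧
    Int.toNat 8 = 8 ∧ Int.toNat 6 = 6 ∧ Int.toNat 4 = 4 ∧ Int.toNat 2 = 2 ∧ Int.toNat 0 = 0 ∧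
    Int.toNat 1 = 1 := by decide

theorem slice10_odd {α : Type} (a b c d e f g h i j : α) :
    (PySem.List.slice? [a,b,c,d,e,f,g,h,i,j] (some (-1)) none (-2)).getD [] = [j,h,f,d,b] := by
  norm_num [PySem.List.slice?, PySem.List.sliceIndices, toNatLit.1, toNatLit.2.1, toNatLit.2.2.1,
    toNatLit.2.2.2.1, List.range_succ, List.filterMap_append, List.filterMap_cons,
    toNatLit.2.2.2.2.2.2.2.2.2]

theorem slice10_even {α : Type} (a b c d e f g h i j : α) :
    (PySem.List.slice? [a,b,c,d,e,f,g,h,i,j] (some (-2)) none (-2)).getD [] = [i,g,e,c,a] := by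
  norm_num [PySem.List.slice?, PySem.List.sliceIndices, toNatLit.1, toNatLit.2.2.2.2.1,
    toNatLit.2.2.2.2.2.1, toNatLit.2.2.2.2.2.2.1, toNatLit.2.2.2.2.2.2.2.1,
    toNatLit.2.2.2.2.2.2.2.2.1, List.range_succ, List.filterMap_append, List.filterMap_cons]

theorem list_len10 {α : Type} (l : List α) (hl : l.length = 10) :
    ∃ a b c d e f g h i j, l = [a,b,c,d,e,f,g,h,i,j] := by
  rcases l with _|⟨a,_|⟨b,_|⟨c,_|⟨d,_|⟨e,_|⟨f,_|⟨g,_|⟨h,_|⟨i,_|⟨j,_|⟨k,t⟩⟩⟩⟩⟩⟩⟩⟩⟩⟩⟩ <;>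
    simp_all

-- ===== VERDICT (by name: the statement is the Claim_ definition above) =====
set_option maxHeartbeats 1000000 in
theorem luhn_eq (s : String) (hl : s.toList.length = 10)
    (hdig : ∀ c ∈ s.toList, PySem.Chars.isdigit c = true) :
    (PySem.Int.mod
        (List.foldl (fun acc d => acc + (luhn_digits_of (d * 2)).sum)
          ((PySem.List.slice? (List.map pyIntChar s.toList) (some (-1)) none (-2)).getD []).sum
          ((PySem.List.slice? (List.map pyIntChar s.toList) (some (-2)) none (-2)).getD []))
        10 == 0) =
    (PySem.Int.mod
        (List.foldl
          (fun acc p =>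
            acc +
              if (PySem.Int.mod p.1 2 == 0) = true then
                if (PySem.Int.ofStr? (String.singleton p.2)).getD 0 * 2 > 9 then
                  (PySem.Int.ofStr? (String.singleton p.2)).getD 0 * 2 - 9
                else (PySem.Int.ofStr? (String.singleton p.2)).getD 0 * 2
              else (PySem.Int.ofStr? (String.singleton p.2)).getD 0)
          0 (PySem.List.enumerate s.toList))
        10 == 0) := by
  obtain ⟨c0,c1,c2,c3,c4,c5,c6,c7,c8,c9,hcs⟩ := list_len10 s.toList hl
  rw [hcs]
  rw [hcs] at hdig
  have bnd : ∀ c ∈ [c0,c1,c2,c3,c4,c5,c6,c7,c8,c9], 0 ≤ pyIntChar c ∧ pyIntChar c ≤ 9 :=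
    fun c hc => pyIntChar_digit c (hdig c hc)
  simp only [List.map_cons, List.map_nil, slice10_odd, slice10_even,
    PySem.List.enumerate_cons, PySem.List.enumerate_nil, List.foldl_cons, List.foldl_nil]
  rw [doubled_sum _ (bnd c8 (by simp)).1 (bnd c8 (by simp)).2,
      doubled_sum _ (bnd c6 (by simp)).1 (bnd c6 (by simp)).2,
      doubled_sum _ (bnd c4 (by simp)).1 (bnd c4 (by simp)).2,
      doubled_sum _ (bnd c2 (by simp)).1 (bnd c2 (by simp)).2,
      doubled_sum _ (bnd c0 (by simp)).1 (bnd c0 (by simp)).2]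
  norm_num [pyIntChar, PySem.Int.mod]
  simp only [show Int.fmod 1 2 = 1 from rfl, show Int.fmod 2 2 = 0 from rfl,
    show Int.fmod 3 2 = 1 from rfl, show Int.fmod 4 2 = 0 from rfl,
    show Int.fmod 5 2 = 1 from rfl, show Int.fmod 6 2 = 0 from rfl,
    show Int.fmod 7 2 = 1 from rfl, show Int.fmod 8 2 = 0 from rfl,
    show Int.fmod 9 2 = 1 from rfl, show Int.fmod 0 2 = 0 from rfl]
  norm_num
  apply Eq.to_iff
  congr 1
  congr 1
  ring

-- ===== VERDICT (by name: the statement is the Claim_ definition above) =====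
theorem validate_saudi_id_py_spec : Claim_equal_validate_saudi_id_py := by
  intro s _hdom
  unfold Spec_validate_saudi_id_py validate_saudi_id_py validate_saudi_id_py_alt
  by_cases h1 : (s.toList.isEmpty || PySem.Str.len s != 10) = true
  · simp only [if_pos h1]
  · simp only [if_neg h1]
    by_cases h2 : (!(PySem.Str.strIsdigit s)) = true
    · simp only [if_pos h2]
    · simp only [if_neg h2]
      by_cases h3 : (!(PySem.Str.startswith s "1" || PySem.Str.startswith s "2")) = true
      · simp only [if_pos h3]
      · simp only [if_neg h3]
        have hl : s.toList.length = 10 := by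
          simp [PySem.Str.len] at h1
          rw [← String.length_toList] at h1
          omega
        have hdig : ∀ c ∈ s.toList, PySem.Chars.isdigit c = true := by
          simp only [Bool.not_eq_true', Bool.not_eq_false] at h2
          simp only [PySem.Str.strIsdigit, PySem.Chars.strIsdigit, Bool.and_eq_true,
            List.all_eq_true] at h2
          exact fun c hc => h2.2 c hc
        exact luhn_eq s hl hdig
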